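-- pv_equiv track=rewrite | github.com/kaixxx/QualCoder | src/qualcoder/ai_skills.py | _infer_description
-- ===== SOURCE A (Python) =====
-- from typing import Any, Dict, List, Optional, Tuple
--
-- def _infer_description(body: str) -> str:
--     text = str(body if body is not None else "")
--     lines = [line.strip() for line in text.splitlines()]
--     paragraph: List[str] = []
--     in_paragraph = False
--     for line in lines:
--         if line == "":
--             if in_paragraph:
--                 break
--             continue
--         paragraph.append(line)
--         in_paragraph = True
--     if len(paragraph) == 0:
--         return ""
--     desc = " ".join(paragraph).strip()
--     if len(desc) > 240:
--         desc = desc[:237].rstrip() + "..."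
--     return desc
-- ===== SOURCE B (Python) =====
-- def _infer_description(body: str) -> str:
--     text = str(body if body is not None else "")
--     stripped = [line.strip() for line in text.splitlines()]
--     blocks = []
--     current = []
--     for line in stripped:
--         if line:
--             current.append(line)
--         else:
--             if current:
--                 blocks.append(current)
--                 current = []
--     if current:
--         blocks.append(current)
--     first = blocks[0] if blocks else []
--     if not first:
--         return ""
--     desc = " ".join(first).strip()
--     if len(desc) > 240:
--         desc = desc[:237].rstrip() + "..."
--     return desc
-- ===== Notes on version B (the rewrite author's own statement) =====
-- stated objective: alternative
-- what changed: Replaces A's stateful scan-with-flag-and-break by a group-then-select structure: segment the stripped lines into paragraph blocks in one pass, then take the first block; the join/strip/truncate tail is unchanged.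
import Mathlib
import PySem

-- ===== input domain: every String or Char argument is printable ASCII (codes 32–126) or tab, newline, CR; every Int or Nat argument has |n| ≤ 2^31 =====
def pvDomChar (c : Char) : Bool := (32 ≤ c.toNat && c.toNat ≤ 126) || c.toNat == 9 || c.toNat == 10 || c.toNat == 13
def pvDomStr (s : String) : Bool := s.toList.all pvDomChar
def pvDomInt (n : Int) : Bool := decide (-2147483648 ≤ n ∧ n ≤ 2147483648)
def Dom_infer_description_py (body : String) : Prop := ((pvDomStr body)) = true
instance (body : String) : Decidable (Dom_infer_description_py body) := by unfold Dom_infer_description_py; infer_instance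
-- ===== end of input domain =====

-- B replaces A's stateful scan-with-flag-and-break by "segment lines into paragraph blocks, then take the first block" (alternative decomposition, same cost).

-- ===== PORT A =====
-- A's for-loop with break/continue over the stripped lines: state (paragraph, in_paragraph)
def inferALoop : List String → List String → Bool → List String
  | [], paragraph, _ => paragraph
  | line :: rest, paragraph, inPara =>
    if line = "" then
      if inPara then paragraph else inferALoop rest paragraph inPara
    else inferALoop rest (paragraph ++ [line]) true

def infer_description_py (body : String) : String :=
  let lines := (PySem.Str.splitlines body).map PySem.Str.strip
  let paragraph := inferALoop lines [] false
  if paragraph.length = 0 then ""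
  else
    let desc := PySem.Str.strip (PySem.Str.join " " paragraph)
    if PySem.Str.len desc > 240 then
      PySem.Str.rstrip (PySem.Str.slice desc none (some 237)) ++ "..."
    else desc

-- ===== PORT B =====
-- B's grouping pass: (current run, blocks so far); a blank line closes the current block
def inferBlocks : List String → List String → List (List String) → List (List String)
  | [], current, blocks => if current = [] then blocks else blocks ++ [current]
  | line :: rest, current, blocks =>
    if line = "" then
      if current = [] then inferBlocks rest [] blocks
      else inferBlocks rest [] (blocks ++ [current])
    else inferBlocks rest (current ++ [line]) blocks

def infer_description_py_alt (body : String) : String :=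
  let stripped := (PySem.Str.splitlines body).map PySem.Str.strip
  let blocks := inferBlocks stripped [] []
  let first := match blocks with | [] => [] | b :: _ => b
  if first = [] then ""
  else
    let desc := PySem.Str.strip (PySem.Str.join " " first)
    if PySem.Str.len desc > 240 then
      PySem.Str.rstrip (PySem.Str.slice desc none (some 237)) ++ "..."
    else desc

-- ===== PRECONDITION & SPEC =====
def Spec_infer_description_py (body : String) (out : String) : Prop := out = infer_description_py_alt body
instance (body : String) (out : String) : Decidable (Spec_infer_description_py body out) := by unfold Spec_infer_description_py; infer_instance

-- ===== CLAIM (what is proved, stated in full; the proofs are below) =====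
def Claim_equal_infer_description_py : Prop := ∀ (body : String), Dom_infer_description_py body → Spec_infer_description_py body (infer_description_py body)

-- ===== LEMMAS AND PROOFS =====

-- A's loop with the flag set collects the maximal run of non-empty lines
theorem inferALoop_true (ls : List String) (p : List String) :
    inferALoop ls p true = p ++ ls.takeWhile (fun l => !(l = "" : Bool)) := by
  induction ls generalizing p with
  | nil => simp [inferALoop]
  | cons l rest ih =>
    by_cases h : l = "" <;> simp [inferALoop, h, ih]

-- A's loop from the initial state: skip blank lines, then take the first run
theorem inferALoop_false (ls : List String) :
    inferALoop ls [] false =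
      (ls.dropWhile (fun l => (l = "" : Bool))).takeWhile (fun l => !(l = "" : Bool)) := by
  induction ls with
  | nil => simp [inferALoop]
  | cons l rest ih =>
    by_cases h : l = ""
    · simp [inferALoop, h, ih]
    · simp [inferALoop, h, List.dropWhile_cons, inferALoop_true]

-- accumulator lemma for B's grouping pass
theorem inferBlocks_acc (ls : List String) (cur : List String) (acc : List (List String)) :
    inferBlocks ls cur acc = acc ++ inferBlocks ls cur [] := by
  induction ls generalizing cur acc with
  | nil => by_cases h : cur = [] <;> simp [inferBlocks, h]
  | cons l rest ih =>
    by_cases h : l = ""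
    · by_cases hc : cur = []
      · simp only [inferBlocks, if_pos h, if_pos hc]
        exact ih [] acc
      · simp only [inferBlocks, if_pos h, if_neg hc]
        rw [ih [] (acc ++ [cur]), ih [] ([] ++ [cur])]
        simp
    · simp only [inferBlocks, if_neg h]
      exact ih (cur ++ [l]) acc

-- with a non-empty current run, the first block is that run extended by the next non-empty lines
theorem inferBlocks_head_cur (ls : List String) (cur : List String) (hc : cur ≠ []) :
    (inferBlocks ls cur []).head? = some (cur ++ ls.takeWhile (fun l => !(l = "" : Bool))) := by
  induction ls generalizing cur with
  | nil => simp [inferBlocks, hc]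
  | cons l rest ih =>
    by_cases h : l = ""
    · rw [inferBlocks]
      simp only [h, if_neg hc]
      rw [inferBlocks_acc]
      simp [h, List.takeWhile_cons]
    · rw [inferBlocks]
      simp only [if_neg h]
      rw [ih _ (by simp)]
      simp [h]

-- from the empty initial state, the first block is A's paragraph
theorem inferBlocks_head (ls : List String) :
    (match inferBlocks ls [] [] with | [] => ([] : List String) | b :: _ => b) =
      (ls.dropWhile (fun l => (l = "" : Bool))).takeWhile (fun l => !(l = "" : Bool)) := by
  induction ls with
  | nil => simp [inferBlocks]
  | cons l rest ih =>
    by_cases h : l = ""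
    · simpa [inferBlocks, h] using ih
    · rw [inferBlocks]
      simp only [if_neg h]
      have := inferBlocks_head_cur rest [l] (by simp)
      simp [List.dropWhile_cons, h]
      cases hE : inferBlocks rest [l] [] with
      | nil => rw [hE] at this; simp at this
      | cons b bs => rw [hE] at this; simpa using this

-- the two paragraph computations agree
theorem paragraphs_eq (ls : List String) :
    inferALoop ls [] false =
      (match inferBlocks ls [] [] with | [] => ([] : List String) | b :: _ => b) := by
  rw [inferALoop_false, inferBlocks_head]

-- ===== VERDICT (by name: the statement is the Claim_ definition above) =====
theorem infer_description_py_spec : Claim_equal_infer_description_py := by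
  intro body _
  unfold Spec_infer_description_py infer_description_py infer_description_py_alt
  simp only [paragraphs_eq]
  cases h : (match inferBlocks ((PySem.Str.splitlines body).map PySem.Str.strip) [] [] with
      | [] => ([] : List String) | b :: _ => b) <;> simp [h]
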